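-- pv_equiv track=rewrite | github.com/ngpgopi/MS-GSP | logic.py | candidateCount
-- ===== SOURCE A (Python) =====
-- import copy
--
-- def checkforOrder(item, inputSubSeq):
--     index = -1
--     tempList = []
--     for element in item:
--         if (index < inputSubSeq.index(element)):
--             index = inputSubSeq.index(element)
--             tempList.append(element)
--     if (tempList == item):
--         return True
--     else:
--         return False
--
-- def candidateCount(c1, inputTransactions):
--     count = 0
--     for inputSeq in inputTransactions:
--         addedItems = []
--         tempc1 = copy.deepcopy(c1)
--         tempInputSeq = copy.deepcopy(inputSeq)
--         for i, ab in enumerate(tempc1):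
--             for j, rz in enumerate(tempInputSeq):
--                 if (set(ab).issubset(set(rz))):
--                     val = checkforOrder(ab, rz)
--                     if (val):
--                         tempInputSeq = tempInputSeq[j + 1:]
--                         addedItems.append(ab)
--                         break
--         if addedItems == c1:
--             count = count + 1
--     return (count)
-- ===== SOURCE B (Python) =====
-- def _matches(item, rz):
--     # item's elements all occur in rz with strictly increasing first-occurrence positions
--     prev = -1
--     for e in item:
--         if e not in rz:
--             return False
--         p = rz.index(e)
--         if p <= prev:
--             return False
--         prev = p
--     return True
--
-- def candidateCount(c1, inputTransactions):
--     n = len(c1)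
--     count = 0
--     for seq in inputTransactions:
--         ptr = 0
--         for rz in seq:
--             if ptr < n and _matches(c1[ptr], rz):
--                 ptr += 1
--         if ptr == n:
--             count += 1
--     return count
-- ===== Notes on version B (the rewrite author's own statement) =====
-- stated objective: simpler
-- what changed: Instead of deepcopying c1 and the transaction and rescanning (and slicing) the remaining itemsets once per candidate while collecting an addedItems list that is compared to c1 at the end, B makes a single forward sweep over each transaction with an integer pointer into c1, advancing it on a match and counting iff the pointer reaches len(c1); the order check short-circuits instead of building and comparing a tempList.
import Mathlib
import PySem

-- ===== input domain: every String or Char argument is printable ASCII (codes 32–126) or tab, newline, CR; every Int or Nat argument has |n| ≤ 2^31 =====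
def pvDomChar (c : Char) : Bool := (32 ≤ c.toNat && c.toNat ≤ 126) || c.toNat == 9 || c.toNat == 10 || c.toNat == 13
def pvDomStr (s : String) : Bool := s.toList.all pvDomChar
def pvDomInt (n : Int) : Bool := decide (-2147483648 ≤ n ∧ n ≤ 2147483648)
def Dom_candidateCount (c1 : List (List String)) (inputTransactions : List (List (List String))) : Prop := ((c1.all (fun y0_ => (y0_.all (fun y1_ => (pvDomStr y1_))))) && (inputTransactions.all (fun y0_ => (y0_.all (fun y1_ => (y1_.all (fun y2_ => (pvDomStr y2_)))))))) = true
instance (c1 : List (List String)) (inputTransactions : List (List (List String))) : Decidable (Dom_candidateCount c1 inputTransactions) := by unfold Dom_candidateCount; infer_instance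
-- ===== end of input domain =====

-- B replaces A's per-candidate rescans (with deepcopies and list slicing) by a single
-- forward sweep over each transaction with an integer pointer into c1 (objective: simpler, no copies).


-- ===== PORT A =====
-- loop of checkforOrder: state (index, tempList); rz.index(element) is evaluated for every
-- element (PySem.List.index?; none = ValueError propagated as none)
def checkforOrderLoop (rz : List String) : List String → Int → List String → Option (Int × List String)
  | [], idx, tl => some (idx, tl)
  | e :: rest, idx, tl =>
    match PySem.List.index? rz e with
    | none => none
    | some p =>
      if idx < (p : Int) then checkforOrderLoop rz rest p (tl ++ [e])
      else checkforOrderLoop rz rest idx tl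

def checkforOrder (item inputSubSeq : List String) : Option Bool :=
  (checkforOrderLoop inputSubSeq item (-1) []).map (fun r => r.2 == item)

-- inner 'for j, rz in enumerate(tempInputSeq)' loop: on a hit returns tempInputSeq[j+1:]
-- (= the tail after the matched element, exact).  (checkforOrder …).getD false is exact here:
-- checkforOrder is none (ValueError) only when an element of ab is missing from rz, which the
-- issubset guard has already excluded.
def innerJ (ab : List String) : List (List String) → Option (List (List String))
  | [] => none
  | rz :: rest =>
    if PySem.Set.issubset (PySem.Set.ofList ab) (PySem.Set.ofList rz) then
      if (checkforOrder ab rz).getD false then some rest else innerJ ab rest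
    else innerJ ab rest

-- 'for i, ab in enumerate(tempc1)' loop: state (tempInputSeq, addedItems); deepcopy of
-- immutable-by-use lists is the identity
def innerLoopA : List (List String) → List (List String) → List (List String) → List (List String)
  | [], _, added => added
  | ab :: rest, seq, added =>
    match innerJ ab seq with
    | some seq' => innerLoopA rest seq' (added ++ [ab])
    | none => innerLoopA rest seq added

def candidateCount (c1 : List (List String)) (inputTransactions : List (List (List String))) : Int :=
  inputTransactions.foldl
    (fun count inputSeq => if innerLoopA c1 inputSeq [] == c1 then count + 1 else count) 0

-- ===== PORT B =====
-- _matches: strictly increasing first-occurrence positions; 'e not in rz' and rz.index(e)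
-- are both PySem.List.index? (none = not in)
def bMatchLoop (rz : List String) : List String → Int → Bool
  | [], _ => true
  | e :: rest, prev =>
    match PySem.List.index? rz e with
    | none => false
    | some p => if (p : Int) ≤ prev then false else bMatchLoop rz rest p

def bMatches (item rz : List String) : Bool := bMatchLoop rz item (-1)

def candidateCount_alt (c1 : List (List String)) (inputTransactions : List (List (List String))) : Int :=
  inputTransactions.foldl
    (fun count seq =>
      let ptr := seq.foldl
        (fun ptr rz => if ptr < c1.length && bMatches (c1.getD ptr []) rz then ptr + 1 else ptr) 0
      if ptr == c1.length then count + 1 else count) 0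

-- ===== PRECONDITION & SPEC =====
def Spec_candidateCount (c1 : List (List String)) (inputTransactions : List (List (List String))) (out : Int) : Prop := out = candidateCount_alt c1 inputTransactions
instance (c1 : List (List String)) (inputTransactions : List (List (List String))) (out : Int) : Decidable (Spec_candidateCount c1 inputTransactions out) := by unfold Spec_candidateCount; infer_instance

-- ===== CLAIM (what is proved, stated in full; the proofs are below) =====
def Claim_equal_candidateCount : Prop := ∀ (c1 : List (List String)) (inputTransactions : List (List (List String))), Dom_candidateCount c1 inputTransactions → Spec_candidateCount c1 inputTransactions (candidateCount c1 inputTransactions)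

-- ===== LEMMAS AND PROOFS =====

-- checkforOrderLoop succeeds exactly when every remaining element occurs in rz
theorem checkLoop_isSome (rz : List String) : ∀ (item : List String) (idx : Int) (tl : List String),
    (checkforOrderLoop rz item idx tl).isSome = true ↔ ∀ e ∈ item, e ∈ rz := by
  intro item
  induction item with
  | nil => intro idx tl; simp [checkforOrderLoop]
  | cons e rest ih =>
    intro idx tl
    simp only [checkforOrderLoop]
    cases h : PySem.List.index? rz e with
    | none =>
      have he : e ∉ rz := (PySem.List.index?_eq_none_iff rz e).mp h
      simp [he]
    | some p =>
      have he : e ∈ rz := (PySem.List.index?_isSome_iff rz e).mp (by rw [h]; rfl)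
      dsimp only
      split_ifs <;> simp [he, ih]

-- the accumulated tempList can never be longer than what was fed in
theorem checkLoop_len (rz : List String) : ∀ (item : List String) (idx : Int) (tl : List String)
    (r : Int × List String), checkforOrderLoop rz item idx tl = some r →
    r.2.length ≤ tl.length + item.length := by
  intro item
  induction item with
  | nil => intro idx tl r h; simp [checkforOrderLoop] at h; simp [← h]
  | cons e rest ih =>
    intro idx tl r h
    simp only [checkforOrderLoop] at h
    cases hp : PySem.List.index? rz e with
    | none => rw [hp] at h; simp at h
    | some p =>
      rw [hp] at h
      dsimp only at h
      split_ifs at h with hcmp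
      · have := ih _ _ _ h; simp at this ⊢; omega
      · have := ih _ _ _ h; simp at this ⊢; omega

-- main correspondence between A's full-scan check and B's short-circuiting check
theorem checkLoop_eq_bMatchLoop (rz : List String) : ∀ (item : List String) (idx : Int) (tl : List String),
    (match checkforOrderLoop rz item idx tl with
      | none => false
      | some r => r.2 == tl ++ item) = bMatchLoop rz item idx := by
  intro item
  induction item with
  | nil => intro idx tl; simp [checkforOrderLoop, bMatchLoop]
  | cons e rest ih =>
    intro idx tl
    simp only [checkforOrderLoop, bMatchLoop]
    cases hp : PySem.List.index? rz e with
    | none => simp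
    | some p =>
      simp only
      by_cases hcmp : idx < (p : Int)
      · have hle : ¬ ((p : Int) ≤ idx) := by omega
        simp only [hcmp, if_true, hle, if_false]
        have := ih p (tl ++ [e])
        simpa [List.append_assoc] using this
      · have hle : (p : Int) ≤ idx := by omega
        simp only [hcmp, if_false, hle, if_true]
        cases hr : checkforOrderLoop rz rest idx tl with
        | none => simp
        | some r =>
          have hlen := checkLoop_len rz rest idx tl r hr
          simp only
          -- r.2 is too short to equal tl ++ e :: rest
          have hne : r.2 ≠ tl ++ e :: rest := by
            intro hEq
            have : r.2.length = tl.length + rest.length + 1 := by simp [hEq]; omega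
            omega
          simp [hne]

-- A's per-itemset test (issubset guard + checkforOrder) equals B's bMatches
theorem match_eq (ab rz : List String) :
    (PySem.Set.issubset (PySem.Set.ofList ab) (PySem.Set.ofList rz) && (checkforOrder ab rz).getD false)
      = bMatches ab rz := by
  by_cases hsub : ∀ e ∈ ab, e ∈ rz
  · have hS : PySem.Set.issubset (PySem.Set.ofList ab) (PySem.Set.ofList rz) = true := by
      rw [PySem.Set.issubset_iff]
      intro x hx
      rw [PySem.Set.mem_ofList] at hx ⊢
      exact hsub x hx
    have hsome : (checkforOrderLoop rz ab (-1) []).isSome = true :=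
      (checkLoop_isSome rz ab (-1) []).mpr hsub
    cases hr : checkforOrderLoop rz ab (-1) [] with
    | none => rw [hr] at hsome; simp at hsome
    | some r =>
      have := checkLoop_eq_bMatchLoop rz ab (-1) []
      rw [hr] at this
      simpa [checkforOrder, hr, hS, bMatches] using this
  · have hS : PySem.Set.issubset (PySem.Set.ofList ab) (PySem.Set.ofList rz) = false := by
      rw [← Bool.not_eq_true, PySem.Set.issubset_iff]
      intro hall
      refine hsub (fun e he => ?_)
      have := hall e (by rw [PySem.Set.mem_ofList]; exact he)
      rwa [PySem.Set.mem_ofList] at this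
    have hnone : checkforOrderLoop rz ab (-1) [] = none := by
      cases hr : checkforOrderLoop rz ab (-1) [] with
      | none => rfl
      | some r =>
        exact absurd ((checkLoop_isSome rz ab (-1) []).mp (by simp [hr])) hsub
    have := checkLoop_eq_bMatchLoop rz ab (-1) []
    rw [hnone] at this
    simp only at this
    simp [hS, bMatches, ← this]

-- proof-side greedy formulation shared by both sides
def findTail (ab : List String) : List (List String) → Option (List (List String))
  | [] => none
  | rz :: rest => if bMatches ab rz then some rest else findTail ab rest

def greedy : List (List String) → List (List String) → Bool
  | [], _ => true
  | ab :: rest, seq =>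
    match findTail ab seq with
    | some seq' => greedy rest seq'
    | none => false

theorem innerJ_eq_findTail (ab : List String) : ∀ seq, innerJ ab seq = findTail ab seq := by
  intro seq
  induction seq with
  | nil => rfl
  | cons rz rest ih =>
    have hb : bMatches ab rz
        = (PySem.Set.issubset (PySem.Set.ofList ab) (PySem.Set.ofList rz) && (checkforOrder ab rz).getD false) :=
      (match_eq ab rz).symm
    cases h1 : PySem.Set.issubset (PySem.Set.ofList ab) (PySem.Set.ofList rz) with
    | false => simp [innerJ, findTail, hb, h1, ih]
    | true =>
      cases h2 : (checkforOrder ab rz).getD false with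
      | false => simp [innerJ, findTail, hb, h1, h2, ih]
      | true => simp [innerJ, findTail, hb, h1, h2]

theorem innerLoopA_acc : ∀ (abs seq added : List (List String)),
    innerLoopA abs seq added = added ++ innerLoopA abs seq [] := by
  intro abs
  induction abs with
  | nil => intro seq added; simp [innerLoopA]
  | cons ab rest ih =>
    intro seq added
    cases h : innerJ ab seq with
    | some seq' =>
      simp only [innerLoopA, h]
      rw [ih seq' (added ++ [ab]), ih seq' ([] ++ [ab])]
      simp
    | none => simp only [innerLoopA, h]; exact ih seq added

theorem innerLoopA_len : ∀ (abs seq : List (List String)),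
    (innerLoopA abs seq []).length ≤ abs.length := by
  intro abs
  induction abs with
  | nil => intro seq; simp [innerLoopA]
  | cons ab rest ih =>
    intro seq
    cases h : innerJ ab seq with
    | some seq' =>
      simp only [innerLoopA, h]
      rw [innerLoopA_acc rest seq' ([] ++ [ab])]
      have := ih seq'; simp; omega
    | none =>
      simp only [innerLoopA, h]
      have := ih seq; simp; omega

theorem innerLoopA_eq_greedy : ∀ (abs seq : List (List String)),
    (innerLoopA abs seq [] == abs) = greedy abs seq := by
  intro abs
  induction abs with
  | nil => intro seq; simp [innerLoopA, greedy]
  | cons ab rest ih =>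
    intro seq
    cases h : innerJ ab seq with
    | some seq' =>
      have hf : findTail ab seq = some seq' := by rw [← innerJ_eq_findTail]; exact h
      simp only [innerLoopA, greedy, h, hf]
      rw [innerLoopA_acc rest seq' ([] ++ [ab])]
      simp only [List.nil_append, List.singleton_append, List.cons_beq_cons, beq_self_eq_true,
        Bool.true_and]
      exact ih seq'
    | none =>
      have hf : findTail ab seq = none := by rw [← innerJ_eq_findTail]; exact h
      simp only [innerLoopA, greedy, h, hf]
      have hlen := innerLoopA_len rest seq
      have hne : innerLoopA rest seq [] ≠ ab :: rest := by
        intro hEq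
        have : (innerLoopA rest seq []).length = rest.length + 1 := by simp [hEq]
        omega
      simp [hne]

theorem foldl_ptr_eq_greedy (c1 : List (List String)) : ∀ (seq : List (List String)) (ptr : Nat),
    ptr ≤ c1.length →
    ((seq.foldl (fun ptr rz => if ptr < c1.length && bMatches (c1.getD ptr []) rz then ptr + 1 else ptr) ptr)
        == c1.length) = greedy (c1.drop ptr) seq := by
  intro seq
  induction seq with
  | nil =>
    intro ptr hle
    rcases Nat.lt_or_ge ptr c1.length with hlt | hge
    · have hdrop := List.drop_eq_getElem_cons hlt
      rw [List.foldl_nil, hdrop]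
      simp only [greedy, findTail]
      have : ptr ≠ c1.length := by omega
      simp [this]
    · have heq : ptr = c1.length := by omega
      simp [heq, greedy]
  | cons rz rest ih =>
    intro ptr hle
    rw [List.foldl_cons]
    rcases Nat.lt_or_ge ptr c1.length with hlt | hge
    · have hdrop := List.drop_eq_getElem_cons hlt
      have hgetD : c1.getD ptr [] = c1[ptr] := List.getD_eq_getElem c1 [] hlt
      by_cases hm : bMatches c1[ptr] rz = true
      · have hcond : (decide (ptr < c1.length) && bMatches (c1.getD ptr []) rz) = true := by
          rw [hgetD]; simp [hlt, hm]
        rw [hcond, if_pos rfl, ih (ptr + 1) (by omega), hdrop]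
        simp [greedy, findTail, hm]
      · have hcond : (decide (ptr < c1.length) && bMatches (c1.getD ptr []) rz) = false := by
          rw [hgetD]; simp [hm]
        rw [hcond, if_neg (by simp), ih ptr hle, hdrop]
        rcases hd2 : List.drop ptr c1 with _ | ⟨ab, t⟩
        · rw [hdrop] at hd2; cases hd2
        · rw [hdrop] at hd2
          injection hd2 with h1 h2
          simp [greedy, findTail, hm]
    · have heq : ptr = c1.length := by omega
      have hcond : (decide (ptr < c1.length) && bMatches (c1.getD ptr []) rz) = false := by
        simp [heq]
      rw [hcond, if_neg (by simp), ih ptr hle]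
      simp [heq, greedy]

-- per-transaction agreement
theorem per_seq (c1 seq : List (List String)) :
    (innerLoopA c1 seq [] == c1)
      = ((seq.foldl (fun ptr rz => if ptr < c1.length && bMatches (c1.getD ptr []) rz then ptr + 1 else ptr) 0)
          == c1.length) := by
  rw [innerLoopA_eq_greedy, foldl_ptr_eq_greedy c1 seq 0 (by omega)]
  simp

theorem candidateCount_eq (c1 : List (List String)) (txs : List (List (List String))) :
    candidateCount c1 txs = candidateCount_alt c1 txs := by
  unfold candidateCount candidateCount_alt
  refine PySem.List.foldl_congr_mem _ _ _ _ (fun count seq _ => ?_)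
  rw [per_seq c1 seq]

-- ===== VERDICT (by name: the statement is the Claim_ definition above) =====
theorem candidateCount_spec : Claim_equal_candidateCount := by
  intro c1 txs _
  unfold Spec_candidateCount
  exact candidateCount_eq c1 txs
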